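-- pv_equiv track=rewrite | github.com/HanneWhitt/ais-rm-bot | tag_users.py | tag_users_string
-- ===== SOURCE A (Python) =====
-- def tag_users_string(text, user_dict):
--     """
--     Replace @username mentions with <@USER_ID> format in a single string.
--
--     Args:
--         text (str): Input text containing potential @mentions
--         user_dict (dict): Dictionary mapping usernames to user IDs
--
--     Returns:
--         str: Text with @mentions replaced by <@USER_ID> format
--     """
--     result = ""
--     i = 0
--
--     while i < len(text):
--         if text[i] == '@':
--             # Find the longest matching username starting from this position
--             longest_match = ""
--             longest_match_length = 0
--
--             # Check all possible usernames in the dictionary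
--             for username in user_dict:
--                 # Check if the text after '@' starts with this username
--                 if (i + 1 + len(username) <= len(text) and
--                     text[i + 1:i + 1 + len(username)] == username):
--                     # If this match is longer than the current longest, use it
--                     if len(username) > longest_match_length:
--                         longest_match = username
--                         longest_match_length = len(username)
--
--             if longest_match:
--                 # Replace @username with <@USER_ID>
--                 result += f"<@{user_dict[longest_match]}>"
--                 i += 1 + longest_match_length  # Skip past the '@' and username
--             else:
--                 # No match found, keep the '@' as is
--                 result += text[i]
--                 i += 1
--         else:
--             result += text[i]
--             i += 1
--
--     return result
-- ===== SOURCE B (Python) =====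
-- def tag_users_string(text, user_dict):
--     """Replace @username mentions with <@USER_ID>, longest match first.
--
--     Instead of scanning every username at each '@' (as A does), look up the
--     candidate substring itself in the dict, trying only the distinct username
--     lengths, longest first.
--     """
--     lengths = sorted({len(u) for u in user_dict if u}, reverse=True)
--     out = []
--     i = 0
--     n = len(text)
--     while i < n:
--         c = text[i]
--         if c == '@':
--             for L in lengths:
--                 cand = text[i + 1:i + 1 + L]
--                 if len(cand) == L and cand in user_dict:
--                     out.append(f"<@{user_dict[cand]}>")
--                     i += 1 + L
--                     break
--             else:
--                 out.append(c)
--                 i += 1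
--         else:
--             out.append(c)
--             i += 1
--     return "".join(out)
-- ===== Notes on version B (the rewrite author's own statement) =====
-- stated objective: faster
-- what changed: At each '@' B looks the candidate substring itself up in the dict, trying only the distinct username lengths longest-first, instead of scanning every username and keeping the longest match.
import Mathlib
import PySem

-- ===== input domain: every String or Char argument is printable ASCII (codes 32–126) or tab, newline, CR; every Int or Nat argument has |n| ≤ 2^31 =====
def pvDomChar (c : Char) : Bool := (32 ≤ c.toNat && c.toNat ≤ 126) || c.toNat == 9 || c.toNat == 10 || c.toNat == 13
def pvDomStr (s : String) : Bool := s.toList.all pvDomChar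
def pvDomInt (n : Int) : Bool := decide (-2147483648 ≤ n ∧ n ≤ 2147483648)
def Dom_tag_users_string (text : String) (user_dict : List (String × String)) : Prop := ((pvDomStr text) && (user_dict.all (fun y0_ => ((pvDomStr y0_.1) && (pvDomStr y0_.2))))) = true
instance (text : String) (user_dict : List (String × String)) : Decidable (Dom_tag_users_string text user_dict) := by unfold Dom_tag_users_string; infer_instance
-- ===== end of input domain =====

-- B replaces A's per-'@' scan over every username by a dict lookup of the candidate
-- substring itself, for each distinct username length longest-first (measured faster).

-- ===== PORT A =====
-- the condition of A's inner if: username u matches at position i, i.e.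
-- i + 1 + len(u) <= len(text) and text[i+1 : i+1+len(u)] == u;
-- '(t.drop (i+1)).take u.toList.length' is that slice (exact for Nat i:
-- PySem.List.slice_natCast_add), u.toList.length = len(u)
abbrev pvM (t : List Char) (i : Nat) (u : String) : Prop :=
  i + 1 + u.toList.length ≤ t.length ∧ (t.drop (i+1)).take u.toList.length = u.toList

-- one iteration of A's inner 'for username in user_dict' loop, on the running
-- (longest_match, longest_match_length) pair
def tagA_step (t : List Char) (i : Nat) (p : String × Nat) (u : String) : String × Nat :=
  if pvM t i u then
    if u.toList.length > p.2 then (u, u.toList.length) else p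
  else p

-- A's 'while i < len(text)' loop; i stays a Nat (it only grows from 0);
-- t.getD i ' ' = text[i] (i < len is guaranteed by the branch);
-- d.getD p.1 "" = user_dict[longest_match] (no KeyError: longest_match is a key)
-- fuel only makes the recursion structural: i grows by ≥ 1 per step, so
-- fuel = len(text) - i bounds the remaining iterations and the 0 case is never
-- reached with i < len(text)
def tagA_loop (t : List Char) (d : PySem.Dict String String) :
    Nat → Nat → List Char → List Char
  | 0, _, result => result
  | fuel+1, i, result =>
    if i < t.length then
      if t.getD i ' ' = '@' then
        let p := d.keys.foldl (tagA_step t i) ("", 0)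
        if p.1 ≠ "" then
          -- result += f"<@{user_dict[longest_match]}>"
          tagA_loop t d fuel (i + 1 + p.2) (result ++ ('<' :: '@' :: ((d.getD p.1 "").toList ++ ['>'])))
        else
          tagA_loop t d fuel (i + 1) (result ++ [t.getD i ' '])
      else
        tagA_loop t d fuel (i + 1) (result ++ [t.getD i ' '])
    else result

def tag_users_string (text : String) (user_dict : List (String × String)) : String :=
  String.ofList (tagA_loop text.toList (PySem.Dict.ofList user_dict) text.toList.length 0 [])

-- ===== PORT B =====
-- B's inner 'for L in lengths: … break' loop: first length whose candidate
-- substring text[i+1:i+1+L] has full length L and is a key of the dict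
def tagB_find (t : List Char) (d : PySem.Dict String String) (i : Nat) :
    List Nat → Option (Nat × List Char)
  | [] => none
  | L :: rest =>
    let cand := (t.drop (i+1)).take L      -- text[i+1 : i+1+L]
    if cand.length = L ∧ d.contains (String.ofList cand) then some (L, cand)
    else tagB_find t d i rest

-- B's while loop, accumulating the 'out' list of fragments (fuel as above)
def tagB_loop (t : List Char) (d : PySem.Dict String String) (lengths : List Nat) :
    Nat → Nat → List (List Char) → List (List Char)
  | 0, _, out => out
  | fuel+1, i, out =>
    if i < t.length then
      let c := t.getD i ' '
      if c = '@' then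
        match tagB_find t d i lengths with
        | some (L, cand) =>
            -- out.append(f"<@{user_dict[cand]}>")
            tagB_loop t d lengths fuel (i + 1 + L) (out ++ [('<' :: '@' :: ((d.getD (String.ofList cand) "").toList ++ ['>']))])
        | none => tagB_loop t d lengths fuel (i + 1) (out ++ [[c]])
      else tagB_loop t d lengths fuel (i + 1) (out ++ [[c]])
    else out

-- sorted({len(u) for u in user_dict if u}, reverse=True); lengths are Nats (len ≥ 0)
def pvLens (d : PySem.Dict String String) : List Nat :=
  PySem.List.sorted
    (PySem.Set.ofList (((d.keys.filter (fun u => u != "")).map (fun u => u.toList.length))))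
    (fun x => x) true

def tag_users_string_alt (text : String) (user_dict : List (String × String)) : String :=
  let d := PySem.Dict.ofList user_dict
  -- "".join(out)  (fragments kept as List Char; joining with sep "" = PySem.Chars.join [])
  String.ofList (PySem.Chars.join [] (tagB_loop text.toList d (pvLens d) text.toList.length 0 []))

-- ===== PRECONDITION & SPEC =====
def Spec_tag_users_string (text : String) (user_dict : List (String × String)) (out : String) : Prop := out = tag_users_string_alt text user_dict
instance (text : String) (user_dict : List (String × String)) (out : String) : Decidable (Spec_tag_users_string text user_dict out) := by unfold Spec_tag_users_string; infer_instance

-- ===== CLAIM (what is proved, stated in full; the proofs are below) =====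
def Claim_equal_tag_users_string : Prop := ∀ (text : String) (user_dict : List (String × String)), Dom_tag_users_string text user_dict → Spec_tag_users_string text user_dict (tag_users_string text user_dict)

-- ===== LEMMAS AND PROOFS =====

-- 'length L hits' — the condition of B's inner if
def pvHit (t : List Char) (d : PySem.Dict String String) (i : Nat) (L : Nat) : Prop :=
  ((t.drop (i+1)).take L).length = L ∧ d.contains (String.ofList ((t.drop (i+1)).take L)) = true

lemma find_none_spec (t : List Char) (d : PySem.Dict String String) (i : Nat) :
    ∀ ls : List Nat, tagB_find t d i ls = none → ∀ L ∈ ls, ¬ pvHit t d i L := by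
  intro ls
  induction ls with
  | nil => intro _ L hL; simp at hL
  | cons L0 rest ih =>
    intro h L hL
    rw [tagB_find] at h
    by_cases hc : ((t.drop (i+1)).take L0).length = L0 ∧
        d.contains (String.ofList ((t.drop (i+1)).take L0)) = true
    · simp only [hc] at h
      exact absurd h (by simp)
    · simp only [if_neg hc] at h
      rcases List.mem_cons.mp hL with rfl | hL
      · exact fun hh => hc ⟨hh.1, hh.2⟩
      · exact ih h L hL

lemma find_some_spec (t : List Char) (d : PySem.Dict String String) (i : Nat)
    (ls : List Nat) (hp : ls.Pairwise (fun a b => b ≤ a)) (L : Nat) (cand : List Char)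
    (h : tagB_find t d i ls = some (L, cand)) :
    cand = (t.drop (i+1)).take L ∧ L ∈ ls ∧ pvHit t d i L ∧
      ∀ L' ∈ ls, pvHit t d i L' → L' ≤ L := by
  induction ls with
  | nil => simp [tagB_find] at h
  | cons L0 rest ih =>
    rw [tagB_find] at h
    have hrest : ∀ b ∈ rest, b ≤ L0 := fun b hb => (List.pairwise_cons.mp hp).1 b hb
    by_cases hc : ((t.drop (i+1)).take L0).length = L0 ∧
        d.contains (String.ofList ((t.drop (i+1)).take L0)) = true
    · rw [if_pos hc] at h
      have hinj := Option.some.inj h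
      have hL0 : L0 = L := congrArg Prod.fst hinj
      have hcand : (t.drop (i+1)).take L0 = cand := congrArg Prod.snd hinj
      subst hL0
      refine ⟨hcand.symm, by simp, ⟨hc.1, hc.2⟩, ?_⟩
      intro L' hL' _
      rcases List.mem_cons.mp hL' with h' | h'
      · exact le_of_eq h'
      · exact hrest L' h'
    · simp only [if_neg hc] at h
      obtain ⟨h1, hm1, h2, h3⟩ := ih (List.pairwise_cons.mp hp).2 h
      refine ⟨h1, List.mem_cons_of_mem _ hm1, h2, ?_⟩
      intro L' hL' hh
      rcases List.mem_cons.mp hL' with h' | h'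
      · exact absurd ⟨(h' ▸ hh).1, (h' ▸ hh).2⟩ hc
      · exact h3 L' h' hh

-- membership in the sorted distinct-length list
lemma mem_pvLens (d : PySem.Dict String String) (L : Nat) :
    L ∈ pvLens d ↔ ∃ u ∈ d.keys, u ≠ "" ∧ u.toList.length = L := by
  unfold pvLens
  rw [PySem.List.mem_sorted, PySem.Set.mem_ofList]
  simp only [List.mem_map, List.mem_filter]
  constructor
  · rintro ⟨u, ⟨hu, hne⟩, rfl⟩
    exact ⟨u, hu, by simpa using hne, rfl⟩
  · rintro ⟨u, hu, hne, rfl⟩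
    exact ⟨u, ⟨hu, by simpa using hne⟩, rfl⟩

lemma pvLens_pairwise (d : PySem.Dict String String) :
    (pvLens d).Pairwise (fun a b => b ≤ a) := by
  unfold pvLens
  exact PySem.List.sorted_pairwise_rev _ _

lemma hit_of_match (t : List Char) (d : PySem.Dict String String) (i : Nat) (u : String)
    (hk : u ∈ d.keys) (hM : pvM t i u) (_hpos : 0 < u.toList.length) :
    pvHit t d i u.toList.length := by
  obtain ⟨h1, h2⟩ := hM
  constructor
  · rw [h2]
  · rw [h2, String.ofList_toList]
    exact (PySem.Dict.contains_iff_mem_keys d u).mpr hk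

lemma match_of_hit (t : List Char) (d : PySem.Dict String String) (i : Nat) (L : Nat)
    (hpos : 0 < L) (h : pvHit t d i L) :
    (String.ofList ((t.drop (i+1)).take L)) ∈ d.keys ∧ pvM t i (String.ofList ((t.drop (i+1)).take L)) ∧
      (String.ofList ((t.drop (i+1)).take L)).toList.length = L := by
  obtain ⟨h1, h2⟩ := h
  have hlen : (String.ofList ((t.drop (i+1)).take L)).toList = (t.drop (i+1)).take L := by simp
  have hle : L ≤ t.length - (i+1) := by
    have h1' := h1
    rw [List.length_take, List.length_drop] at h1'
    omega
  refine ⟨(PySem.Dict.contains_iff_mem_keys d _).mp h2, ⟨?_, ?_⟩, by rw [hlen, h1]⟩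
  · rw [hlen, h1]; omega
  · rw [hlen, h1]

lemma fold_nil_spec (t : List Char) (i : Nat) :
    ∀ ks : List String, (∀ u ∈ ks, pvM t i u → u.toList.length = 0) →
      ks.foldl (tagA_step t i) ("", 0) = ("", 0) := by
  intro ks
  induction ks with
  | nil => intro _; rfl
  | cons u rest ih =>
    intro h
    have hstep : tagA_step t i ("", 0) u = ("", 0) := by
      unfold tagA_step
      split
      · rename_i hM
        have := h u (by simp) hM
        simp [this]
      · rfl
    rw [List.foldl_cons, hstep]
    exact ih (fun v hv => h v (List.mem_cons_of_mem _ hv))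

lemma fold_exact (t : List Char) (i : Nat) (w : String) (hwM : pvM t i w)
    (hwpos : 0 < w.toList.length) :
    ∀ (ks : List String) (p : String × Nat),
      (∀ u ∈ ks, pvM t i u → u.toList.length ≤ w.toList.length ∧
        (u.toList.length = w.toList.length → u = w)) →
      (p = ("", 0) ∨ (pvM t i p.1 ∧ p.2 = p.1.toList.length ∧ 0 < p.1.toList.length ∧
        p.1.toList.length ≤ w.toList.length ∧ (p.1.toList.length = w.toList.length → p.1 = w))) →
      (w ∈ ks ∨ p = (w, w.toList.length)) →
      ks.foldl (tagA_step t i) p = (w, w.toList.length) := by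
  intro ks
  induction ks with
  | nil =>
    intro p _ _ hmem
    rcases hmem with hm | rfl
    · simp at hm
    · rfl
  | cons u rest ih =>
    intro p hks hinv hmem
    rw [List.foldl_cons]
    have hrest : ∀ v ∈ rest, pvM t i v → v.toList.length ≤ w.toList.length ∧
        (v.toList.length = w.toList.length → v = w) :=
      fun v hv => hks v (List.mem_cons_of_mem _ hv)
    by_cases hMu : pvM t i u
    · obtain ⟨hle, heq⟩ := hks u (by simp) hMu
      by_cases hgt : u.toList.length > p.2
      · have hstep : tagA_step t i p u = (u, u.toList.length) := by
          unfold tagA_step; rw [if_pos hMu, if_pos hgt]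
        rw [hstep]
        have hupos : 0 < u.toList.length := by
          rcases hinv with rfl | ⟨_, hp2, hppos, _, _⟩
          · simpa using hgt
          · omega
        apply ih _ hrest (Or.inr ⟨hMu, rfl, hupos, hle, heq⟩)
        by_cases huw : u = w
        · exact Or.inr (by rw [huw])
        · rcases hmem with hm | hpw
          · rcases List.mem_cons.mp hm with h' | h'
            · exact absurd h'.symm huw
            · exact Or.inl h'
          · -- p = (w, |w|) but u.length > p.2 = |w| ≥ u.length: contradiction
            exfalso
            have : p.2 = w.toList.length := by rw [hpw]
            omega
      · have hstep : tagA_step t i p u = p := by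
          unfold tagA_step; rw [if_pos hMu, if_neg hgt]
        rw [hstep]
        apply ih _ hrest hinv
        rcases hmem with hm | hpw
        · rcases List.mem_cons.mp hm with h' | h'
          · -- u = w and ¬(|u| > p.2): the accumulator already is (w, |w|)
            rcases hinv with rfl | ⟨_, hp2, _, hple, hpeq⟩
            · exfalso
              simp only [not_lt, Nat.le_zero] at hgt
              rw [← h'] at hgt
              omega
            · have h1 : w.toList.length ≤ p.2 := by rw [h']; exact Nat.le_of_not_lt hgt
              have hfw : p.1 = w := hpeq (by omega)
              right
              rw [Prod.ext_iff]
              exact ⟨hfw, by rw [hp2, hfw]⟩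
          · exact Or.inl h'
        · exact Or.inr hpw
    · have hstep : tagA_step t i p u = p := by
        unfold tagA_step; rw [if_neg hMu]
      rw [hstep]
      apply ih _ hrest hinv
      rcases hmem with hm | hpw
      · rcases List.mem_cons.mp hm with h' | h'
        · exact absurd (h' ▸ hwM) hMu
        · exact Or.inl h'
      · exact Or.inr hpw

-- the two inner loops agree: A's best-match fold is determined by B's first-hit search
lemma fold_of_find_none (t : List Char) (d : PySem.Dict String String) (i : Nat)
    (h : tagB_find t d i (pvLens d) = none) :
    d.keys.foldl (tagA_step t i) ("", 0) = ("", 0) := by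
  apply fold_nil_spec
  intro u hu hM
  by_contra hne
  have hpos : 0 < u.toList.length := Nat.pos_of_ne_zero hne
  have hne' : u ≠ "" := by
    intro e; subst e; simp at hpos
  have hmem : u.toList.length ∈ pvLens d := (mem_pvLens d _).mpr ⟨u, hu, hne', rfl⟩
  exact find_none_spec t d i _ h _ hmem (hit_of_match t d i u hu hM hpos)

lemma fold_of_find_some (t : List Char) (d : PySem.Dict String String) (i : Nat)
    (L : Nat) (cand : List Char) (h : tagB_find t d i (pvLens d) = some (L, cand)) :
    d.keys.foldl (tagA_step t i) ("", 0) = (String.ofList cand, L) ∧ 0 < L ∧ cand.length = L := by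
  obtain ⟨hcand, hLmem, hhit, hmax⟩ := find_some_spec t d i _ (pvLens_pairwise d) L cand h
  have hLpos : 0 < L := by
    obtain ⟨u, _, hne, hlen⟩ := (mem_pvLens d L).mp hLmem
    have hnil : u.toList ≠ [] := fun e => hne (by
      have := congrArg String.ofList e
      simpa using this)
    have := List.length_pos_iff.mpr hnil
    omega
  obtain ⟨hwk, hwM, hwlen⟩ := match_of_hit t d i L hLpos hhit
  subst hcand
  have hfold := fold_exact t i (String.ofList ((t.drop (i+1)).take L)) hwM (by omega)
    d.keys ("", 0) ?_ (Or.inl rfl) (Or.inl hwk)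
  · rw [hfold, hwlen]
    exact ⟨rfl, hLpos, hhit.1⟩
  · intro u hu hM
    by_cases hz : u.toList.length = 0
    · constructor
      · omega
      · intro he; omega
    · have hupos : 0 < u.toList.length := by omega
      have hne' : u ≠ "" := by intro e; subst e; simp at hupos
      have humem : u.toList.length ∈ pvLens d := (mem_pvLens d _).mpr ⟨u, hu, hne', rfl⟩
      have hule : u.toList.length ≤ L := hmax _ humem (hit_of_match t d i u hu hM hupos)
      refine ⟨by omega, ?_⟩
      intro he
      rw [hwlen] at he
      apply String.toList_inj.mp
      have h2 := hM.2
      rw [he] at h2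
      simp [← h2]

lemma join_empty_flatten (l : List (List Char)) : PySem.Chars.join [] l = l.flatten := by
  induction l with
  | nil => simp [PySem.Chars.join_nil]
  | cons p rest ih =>
    cases rest with
    | nil => simp [PySem.Chars.join_singleton]
    | cons q rest' =>
      rw [PySem.Chars.join_cons_cons]
      simp only [List.flatten_cons]
      rw [ih]
      simp

lemma join_append (out : List (List Char)) (s : List Char) :
    PySem.Chars.join [] (out ++ [s]) = PySem.Chars.join [] out ++ s := by
  rw [join_empty_flatten, join_empty_flatten]
  simp

-- main loop invariant: both while loops produce the same text from equal accumulators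
lemma loop_eq (t : List Char) (d : PySem.Dict String String) :
    ∀ (fuel i : Nat) (out : List (List Char)), t.length - i ≤ fuel →
      tagA_loop t d fuel i (PySem.Chars.join [] out)
        = PySem.Chars.join [] (tagB_loop t d (pvLens d) fuel i out) := by
  intro fuel
  induction fuel with
  | zero => intro i out hle; rfl
  | succ n ih =>
    intro i out hle
    rw [tagA_loop, tagB_loop]
    by_cases h : i < t.length
    · rw [if_pos h, if_pos h]
      by_cases hc : t.getD i ' ' = '@'
      · rw [if_pos hc, if_pos hc]
        cases hf : tagB_find t d i (pvLens d) with
        | none =>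
          rw [fold_of_find_none t d i hf]
          simp only [ne_eq, not_true_eq_false, if_false]
          rw [← join_append]
          exact ih (i+1) (out ++ [[t.getD i ' ']]) (by omega)
        | some pr =>
          obtain ⟨L, cand⟩ := pr
          obtain ⟨hfold, hLpos, hclen⟩ := fold_of_find_some t d i L cand hf
          rw [hfold]
          simp only [ne_eq]
          have hne : ¬ String.ofList cand = "" := by
            intro e
            have hnil : cand = [] := by simpa using congrArg String.toList e
            rw [hnil] at hclen
            simp at hclen
            omega
          rw [if_pos hne]
          rw [← join_append]
          exact ih (i+1+L) (out ++ [('<' :: '@' :: ((d.getD (String.ofList cand) "").toList ++ ['>']))]) (by omega)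
      · rw [if_neg hc, if_neg hc]
        rw [← join_append]
        exact ih (i+1) (out ++ [[t.getD i ' ']]) (by omega)
    · rw [if_neg h, if_neg h]

-- ===== VERDICT (by name: the statement is the Claim_ definition above) =====
theorem tag_users_string_spec : Claim_equal_tag_users_string := by
  intro text user_dict _
  unfold Spec_tag_users_string tag_users_string tag_users_string_alt
  have h := loop_eq text.toList (PySem.Dict.ofList user_dict) (text.toList.length) 0 [] (by omega)
  rw [PySem.Chars.join_nil] at h
  rw [h]
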